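-- pv_equiv track=rewrite | github.com/MultiQC/MultiQC | multiqc/modules/bcl2fastq/bcl2fastq.py | get_bar_data_from_undetermined
-- ===== SOURCE A (Python) =====
-- from collections import OrderedDict, defaultdict
-- from itertools import islice
--
-- def get_bar_data_from_undetermined(flowcells):
--     """Get data to plot for undetermined barcodes."""
--     bar_data = defaultdict(dict)
--     # get undetermined barcodes for each lanes
--     for lane_id, lane in flowcells.items():
--         try:
--             for barcode, count in islice(lane["unknown_barcodes"].items(), 20):
--                 bar_data[barcode][lane_id] = count
--         except AttributeError:
--             pass
--
--     # sort results
--     bar_data = OrderedDict(sorted(bar_data.items(), key=lambda x: sum(x[1].values()), reverse=True))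
--     return OrderedDict((key, value) for key, value in islice(bar_data.items(), 20))
-- ===== SOURCE B (Python) =====
-- from collections import OrderedDict
-- from itertools import islice
--
-- def get_bar_data_from_undetermined(flowcells):
--     """Get data to plot for undetermined barcodes."""
--     # Stage 1: flatten to (barcode, lane_id, count) triples, top 20 per lane.
--     triples = [(barcode, lane_id, count)
--                for lane_id, lane in flowcells.items()
--                for barcode, count in islice(lane["unknown_barcodes"].items(), 20)]
--     # Stage 2: distinct barcodes in first-occurrence order; rebuild each
--     # barcode's lane dict by a filtering comprehension over the flat triples.
--     barcodes = list(dict.fromkeys(b for b, _, _ in triples))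
--     items = [(bc, {lid: c for b, lid, c in triples if b == bc}) for bc in barcodes]
--     # Stage 3: sort by total count (stable, descending), keep top 20.
--     items.sort(key=lambda it: sum(it[1].values()), reverse=True)
--     return OrderedDict(items[:20])
-- ===== Notes on version B (the rewrite author's own statement) =====
-- stated objective: alternative
-- what changed: A builds a nested defaultdict incrementally while scanning lanes and then sorts its items; B works in three staged passes: flatten everything to (barcode, lane_id, count) triples, dedup barcodes in first-occurrence order, rebuild each barcode's lane dict by a filtering comprehension over the flat triples, then sort and take the top 20.
import Mathlib
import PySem

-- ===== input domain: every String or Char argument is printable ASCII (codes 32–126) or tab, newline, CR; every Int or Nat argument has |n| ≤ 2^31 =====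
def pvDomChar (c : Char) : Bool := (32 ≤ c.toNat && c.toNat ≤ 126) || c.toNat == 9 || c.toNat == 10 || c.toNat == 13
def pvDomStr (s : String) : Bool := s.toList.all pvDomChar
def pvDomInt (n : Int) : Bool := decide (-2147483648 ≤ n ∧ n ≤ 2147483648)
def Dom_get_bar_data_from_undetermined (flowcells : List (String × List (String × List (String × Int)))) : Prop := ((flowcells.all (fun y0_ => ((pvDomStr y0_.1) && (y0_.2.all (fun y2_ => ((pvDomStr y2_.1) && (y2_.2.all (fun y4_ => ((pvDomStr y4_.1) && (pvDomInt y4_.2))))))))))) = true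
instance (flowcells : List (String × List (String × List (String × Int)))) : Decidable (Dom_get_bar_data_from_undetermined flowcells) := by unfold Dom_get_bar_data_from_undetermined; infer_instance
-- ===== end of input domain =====

-- B replaces A's incremental nested defaultdict by three staged passes (flatten to triples,
-- dedup barcodes, rebuild each lane dict by filtering) — objective: alternative.

-- ===== PORT A =====
-- bar_data[barcode][lane_id] = count  (defaultdict(dict): an absent barcode starts from an empty dict)
def pvA_inner (lane_id : String) (bd : PySem.Dict String (PySem.Dict String Int)) (q : String × Int) :
    PySem.Dict String (PySem.Dict String Int) :=
  bd.insert q.1 ((bd.getD q.1 PySem.Dict.empty).insert lane_id q.2)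

-- one outer-loop iteration; a lane without key "unknown_barcodes" raises KeyError in Python
-- (excluded by Pre_), the port returns bd unchanged there
def pvA_lane (bd : PySem.Dict String (PySem.Dict String Int))
    (p : String × List (String × List (String × Int))) : PySem.Dict String (PySem.Dict String Int) :=
  match (PySem.Dict.mk p.2).get? "unknown_barcodes" with
  | none => bd
  | some ub => (ub.take 20).foldl (pvA_inner p.1) bd

def get_bar_data_from_undetermined (flowcells : List (String × List (String × List (String × Int)))) : List (String × List (String × Int)) :=
  let bar_data := flowcells.foldl pvA_lane PySem.Dict.empty
  -- sorted(bar_data.items(), key=lambda x: sum(x[1].values()), reverse=True), then islice(..., 20)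
  ((PySem.List.sorted bar_data.items (fun x => x.2.values.sum) true).take 20).map
    (fun p => (p.1, p.2.items))

-- ===== PORT B =====
-- Stage 1: the flattening comprehension; a missing "unknown_barcodes" key raises KeyError in Python
def pvB_triples (flowcells : List (String × List (String × List (String × Int)))) :
    List (String × String × Int) :=
  flowcells.flatMap (fun p =>
    match (PySem.Dict.mk p.2).get? "unknown_barcodes" with
    | none => []
    | some ub => (ub.take 20).map (fun q => (q.1, p.1, q.2)))

-- the dict comprehension {lid: c for b, lid, c in triples if b == bc}
-- (exact incl. duplicate-key overwrite: one pass of conditional inserts)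
def pvB_group (triples : List (String × String × Int)) (bc : String) : PySem.Dict String Int :=
  triples.foldl (fun d t => if t.1 == bc then d.insert t.2.1 t.2.2 else d) PySem.Dict.empty

def get_bar_data_from_undetermined_alt (flowcells : List (String × List (String × List (String × Int)))) : List (String × List (String × Int)) :=
  let triples := pvB_triples flowcells
  -- list(dict.fromkeys(...)) = ordered dedup
  let barcodes := PySem.List.dedup (triples.map (·.1))
  let items := barcodes.map (fun bc => (bc, pvB_group triples bc))
  -- items.sort(key=..., reverse=True); OrderedDict(items[:20])
  ((PySem.List.sorted items (fun it => it.2.values.sum) true).take 20).map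
    (fun p => (p.1, p.2.items))

-- ===== PRECONDITION & SPEC =====
-- Pre_ excludes exactly the inputs where some lane dict has no key "unknown_barcodes":
-- there Python A raises KeyError (the try only catches AttributeError), and B raises too.
def Pre_get_bar_data_from_undetermined (flowcells : List (String × List (String × List (String × Int)))) : Prop :=
  ∀ p ∈ flowcells, ∃ q ∈ p.2, q.1 = "unknown_barcodes"
instance (flowcells : List (String × List (String × List (String × Int)))) : Decidable (Pre_get_bar_data_from_undetermined flowcells) := by unfold Pre_get_bar_data_from_undetermined; infer_instance

def pvWitness_get_bar_data_from_undetermined : (List (String × List (String × List (String × Int)))) :=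
  [("L1", [("unknown_barcodes", [("AAAA", 5), ("CCCC", 2)])]),
   ("L2", [("unknown_barcodes", [("CCCC", 7)])])]

def Spec_get_bar_data_from_undetermined (flowcells : List (String × List (String × List (String × Int)))) (out : List (String × List (String × Int))) : Prop := out = get_bar_data_from_undetermined_alt flowcells
instance (flowcells : List (String × List (String × List (String × Int)))) (out : List (String × List (String × Int))) : Decidable (Spec_get_bar_data_from_undetermined flowcells out) := by unfold Spec_get_bar_data_from_undetermined; infer_instance

-- ===== CLAIM (what is proved, stated in full; the proofs are below) =====
def Claim_equal_get_bar_data_from_undetermined : Prop := ∀ (flowcells : List (String × List (String × List (String × Int)))), Dom_get_bar_data_from_undetermined flowcells → Pre_get_bar_data_from_undetermined flowcells → Spec_get_bar_data_from_undetermined flowcells (get_bar_data_from_undetermined flowcells)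

-- ===== LEMMAS AND PROOFS =====

-- A's nested-dict step, rephrased on a flat triple
def pvStep (bd : PySem.Dict String (PySem.Dict String Int)) (t : String × String × Int) :
    PySem.Dict String (PySem.Dict String Int) :=
  bd.insert t.1 ((bd.getD t.1 PySem.Dict.empty).insert t.2.1 t.2.2)

-- A's double loop = one fold over B's flattened triples
lemma pv_fold_flatten (fc : List (String × List (String × List (String × Int)))) :
    ∀ bd, fc.foldl pvA_lane bd = (pvB_triples fc).foldl pvStep bd := by
  induction fc with
  | nil => intro bd; rfl
  | cons p rest ih =>
    intro bd
    simp only [List.foldl_cons, pvB_triples, List.flatMap_cons, List.foldl_append]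
    rw [← pvB_triples]
    rw [← ih]
    congr 1
    unfold pvA_lane
    cases h : (PySem.Dict.mk p.2).get? "unknown_barcodes" with
    | none => rfl
    | some ub =>
      rw [List.foldl_map]
      rfl

-- looking up one barcode through A's fold = B's filtered rebuild of its lane dict
lemma pv_fold_getD (l : List (String × String × Int)) :
    ∀ (d : PySem.Dict String (PySem.Dict String Int)) (bc : String),
      (l.foldl pvStep d).getD bc PySem.Dict.empty
        = l.foldl (fun inner t => if t.1 == bc then inner.insert t.2.1 t.2.2 else inner)
            (d.getD bc PySem.Dict.empty) := by
  induction l with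
  | nil => intro d bc; rfl
  | cons t rest ih =>
    intro d bc
    simp only [List.foldl_cons]
    rw [ih]
    congr 1
    by_cases h : t.1 = bc
    · subst h
      simp [pvStep, PySem.Dict.getD_insert_self]
    · have hb : (t.1 == bc) = false := by simpa using h
      simp [pvStep, PySem.Dict.getD_insert, show ¬bc = t.1 from fun hh => h hh.symm, hb]

-- ===== VERDICT (by name: the statement is the Claim_ definition above) =====
theorem get_bar_data_from_undetermined_spec : Claim_equal_get_bar_data_from_undetermined := by
  intro flowcells _ _
  unfold Spec_get_bar_data_from_undetermined
  unfold get_bar_data_from_undetermined get_bar_data_from_undetermined_alt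
  dsimp only
  rw [pv_fold_flatten flowcells PySem.Dict.empty]
  set l := pvB_triples flowcells with hl
  have hstep : pvStep = (fun (d : PySem.Dict String (PySem.Dict String Int)) (t : String × String × Int) =>
      d.insert ((fun (t : String × String × Int) => t.1) t)
        ((fun (d : PySem.Dict String (PySem.Dict String Int)) (t : String × String × Int) =>
          (d.getD t.1 PySem.Dict.empty).insert t.2.1 t.2.2) d t)) := rfl
  have hnd : (l.foldl pvStep PySem.Dict.empty).keys.Nodup := by
    rw [hstep]
    exact PySem.Dict.nodup_keys_foldl_insert_key l _ _ PySem.Dict.empty PySem.Dict.nodup_keys_empty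
  have hkeys : (l.foldl pvStep PySem.Dict.empty).keys = PySem.List.dedup (l.map (·.1)) := by
    rw [hstep, PySem.Dict.keys_foldl_insert_key]
    simp [PySem.Dict.keys_empty, PySem.Set.update, PySem.Set.ofList, PySem.Set.empty,
      PySem.List.dedup_eq_ofList]
  have hitems : (List.foldl pvStep PySem.Dict.empty l).items
      = (PySem.List.dedup (l.map (fun x => x.1))).map (fun bc => (bc, pvB_group l bc)) := by
    rw [PySem.Dict.items_eq_map_keys _ hnd PySem.Dict.empty, hkeys]
    apply List.map_congr_left
    intro bc _
    rw [pv_fold_getD l PySem.Dict.empty bc]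
    simp [pvB_group, PySem.Dict.getD_empty]
  rw [hitems]
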